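-- pv_equiv track=rewrite | github.com/Wasima03/PYTHON | examen2/ejercicio1.py | esconderPin
-- ===== SOURCE A (Python) =====
-- def esconderPin(pin):
--     numeros=[]
--     linea="XXXXXXXXXX"
--     lista=[]
--     for i in pin:
--         numeros.append(i)
--     for num in numeros:
--         match num:
--             case "1": lista.append("0XXXXXXXXX")
--             case "2": lista.append("X0XXXXXXXX")
--             case "3": lista.append("XX0XXXXXXX")
--             case "4": lista.append("XXX0XXXXXX")
--             case "5": lista.append("XXXX0XXXXX")
--             case "6": lista.append("XXXXX0XXXX")
--             case "7": lista.append("XXXXXX0XXX")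
--             case "8": lista.append("XXXXXXX0XX")
--             case "9": lista.append("XXXXXXXX0X")
--             case "0": lista.append("XXXXXXXXX0")
--     tupla=tuple(lista)
--     return tupla
-- ===== SOURCE B (Python) =====
-- def esconderPin(pin):
--     return tuple(
--         "X" * i + "0" + "X" * (9 - i)
--         for i in ((int(c) - 1) % 10 for c in pin if c in {"0","1","2","3","4","5","6","7","8","9"})
--     )
-- ===== Notes on version B (the rewrite author's own statement) =====
-- stated objective: simpler
-- what changed: Replaces A's two explicit loops and ten-case match lookup table with a single generator expression that computes each mask's zero position arithmetically as (int(c)-1)%10 and builds the mask by string repetition.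
import Mathlib
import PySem

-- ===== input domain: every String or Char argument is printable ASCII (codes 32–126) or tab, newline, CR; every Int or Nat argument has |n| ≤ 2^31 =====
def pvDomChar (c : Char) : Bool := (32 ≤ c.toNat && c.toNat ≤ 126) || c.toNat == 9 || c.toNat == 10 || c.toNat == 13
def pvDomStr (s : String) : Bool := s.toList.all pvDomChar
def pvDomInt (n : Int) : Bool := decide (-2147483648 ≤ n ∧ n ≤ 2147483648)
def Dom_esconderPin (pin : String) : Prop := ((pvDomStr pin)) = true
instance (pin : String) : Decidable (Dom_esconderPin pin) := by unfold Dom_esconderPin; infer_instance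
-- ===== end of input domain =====

-- B replaces A's two loops and ten-case match table with one pass computing the
-- zero position arithmetically ((int(c)-1) % 10) and building the mask by repetition; objective: simpler.

-- ===== PORT A =====
-- A's per-character match: append the looked-up mask, or leave the list unchanged.
def esconderPinStep (lista : List String) (num : Char) : List String :=
  if num = '1' then lista ++ ["0XXXXXXXXX"]
  else if num = '2' then lista ++ ["X0XXXXXXXX"]
  else if num = '3' then lista ++ ["XX0XXXXXXX"]
  else if num = '4' then lista ++ ["XXX0XXXXXX"]
  else if num = '5' then lista ++ ["XXXX0XXXXX"]
  else if num = '6' then lista ++ ["XXXXX0XXXX"]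
  else if num = '7' then lista ++ ["XXXXXX0XXX"]
  else if num = '8' then lista ++ ["XXXXXXX0XX"]
  else if num = '9' then lista ++ ["XXXXXXXX0X"]
  else if num = '0' then lista ++ ["XXXXXXXXX0"]
  else lista

def esconderPin (pin : String) : List String :=
  let numeros := pin.toList.foldl (fun acc i => acc ++ [i]) []
  numeros.foldl esconderPinStep []

-- ===== PORT B =====
-- mask for digit char c: "X"*i + "0" + "X"*(9-i) with i = (int(c)-1) % 10
def esconderPinMask? (c : Char) : Option String :=
  if c ∈ ['0', '1', '2', '3', '4', '5', '6', '7', '8', '9'] then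
    let i := (c.toNat - 48 + 9) % 10
    some (String.mk (List.replicate i 'X' ++ '0' :: List.replicate (9 - i) 'X'))
  else none

def esconderPin_alt (pin : String) : List String :=
  pin.toList.filterMap esconderPinMask?

-- ===== PRECONDITION & SPEC =====
def Spec_esconderPin (pin : String) (out : List String) : Prop := out = esconderPin_alt pin
instance (pin : String) (out : List String) : Decidable (Spec_esconderPin pin out) := by unfold Spec_esconderPin; infer_instance

-- ===== CLAIM (what is proved, stated in full; the proofs are below) =====
def Claim_equal_esconderPin : Prop := ∀ (pin : String), Dom_esconderPin pin → Spec_esconderPin pin (esconderPin pin)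

-- ===== LEMMAS AND PROOFS =====

theorem foldl_append_singleton (l : List Char) : ∀ acc : List Char,
    l.foldl (fun acc i => acc ++ [i]) acc = acc ++ l := by
  induction l with
  | nil => intro acc; simp
  | cons c t ih => intro acc; simp [List.foldl, ih]

theorem esconderPinStep_eq (lista : List String) (c : Char) :
    esconderPinStep lista c = lista ++ (esconderPinMask? c).toList := by
  unfold esconderPinStep esconderPinMask?
  split_ifs with h1 h2 h3 h4 h5 h6 h7 h8 h9 h0 <;>
    first
      | (subst_vars; rfl)
      | (simp_all)

theorem foldl_step (l : List Char) : ∀ acc : List String,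
    l.foldl esconderPinStep acc = acc ++ l.filterMap esconderPinMask? := by
  induction l with
  | nil => intro acc; simp
  | cons c t ih =>
    intro acc
    simp only [List.foldl, List.filterMap_cons, esconderPinStep_eq]
    cases h : esconderPinMask? c <;> simp [ih]

-- ===== VERDICT (by name: the statement is the Claim_ definition above) =====
theorem esconderPin_spec : Claim_equal_esconderPin := by
  intro pin _
  show esconderPin pin = esconderPin_alt pin
  unfold esconderPin esconderPin_alt
  rw [foldl_append_singleton, List.nil_append, foldl_step, List.nil_append]
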